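-- pv_equiv track=rewrite | github.com/luoshaozhuo/Whale | src/whale/shared/source/opcua/reader.py | _parse_logical_names
-- ===== SOURCE A (Python) =====
-- def _parse_logical_names(identifier: str) -> tuple[str, str, str]:
--     """从 OPC UA 字符串标识解析 ld/ln/do 名称。"""
--     parts = [part for part in identifier.split(".") if part]
--     if len(parts) >= 4:
--         return parts[-3], parts[-2], parts[-1]
--     if len(parts) == 3:
--         return parts[0], parts[1], parts[2]
--     if len(parts) == 2:
--         return "", parts[0], parts[1]
--     if len(parts) == 1:
--         return "", "", parts[0]
--     return "", "", ""
-- ===== SOURCE B (Python) =====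
-- def _parse_logical_names(identifier: str) -> tuple[str, str, str]:
--     """从 OPC UA 字符串标识解析 ld/ln/do 名称。"""
--     names = ["", "", ""]
--     idx = 2
--     cur = []
--     for ch in reversed(identifier):
--         if ch == ".":
--             if cur:
--                 names[idx] = "".join(reversed(cur))
--                 idx -= 1
--                 if idx < 0:
--                     break
--                 cur = []
--         else:
--             cur.append(ch)
--     if idx >= 0 and cur:
--         names[idx] = "".join(reversed(cur))
--     return (names[0], names[1], names[2])
-- ===== Notes on version B (the rewrite author's own statement) =====
-- stated objective: alternative
-- what changed: Instead of splitting the string into a filtered list of parts and selecting by a five-branch length cascade, B does one reverse character scan that assembles the current segment, fills the three name slots from the right, and exits early once all three are found.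
import Mathlib
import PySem

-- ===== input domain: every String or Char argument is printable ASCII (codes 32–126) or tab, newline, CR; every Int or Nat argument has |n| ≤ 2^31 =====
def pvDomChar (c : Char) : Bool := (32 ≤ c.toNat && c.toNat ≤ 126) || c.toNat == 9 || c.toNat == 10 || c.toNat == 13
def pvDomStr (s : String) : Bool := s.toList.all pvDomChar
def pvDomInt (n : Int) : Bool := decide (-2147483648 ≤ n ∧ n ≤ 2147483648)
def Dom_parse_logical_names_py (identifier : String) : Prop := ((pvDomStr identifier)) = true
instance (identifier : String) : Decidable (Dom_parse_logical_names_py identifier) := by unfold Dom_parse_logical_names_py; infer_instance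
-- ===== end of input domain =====

-- B replaces A's split-filter-then-five-branch-cascade by a single reverse character scan with
-- early exit once the three name slots are filled (objective: alternative algorithm, same cost).

-- ===== PORT A =====
-- the branch cascade of A, on the filtered parts list
def pvCascade (parts : List String) : String × String × String :=
  if 4 ≤ parts.length then
    (PySem.List.pyGetD parts (-3) "", PySem.List.pyGetD parts (-2) "", PySem.List.pyGetD parts (-1) "")
  else if parts.length = 3 then
    (PySem.List.pyGetD parts 0 "", PySem.List.pyGetD parts 1 "", PySem.List.pyGetD parts 2 "")
  else if parts.length = 2 then
    ("", PySem.List.pyGetD parts 0 "", PySem.List.pyGetD parts 1 "")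
  else if parts.length = 1 then
    ("", "", PySem.List.pyGetD parts 0 "")
  else ("", "", "")

def parse_logical_names_py (identifier : String) : String × String × String :=
  pvCascade (((PySem.Str.split? identifier ".").getD []).filter (fun p => p ≠ ""))

-- ===== PORT B =====
-- names[idx] = cur for idx ∈ {0,1,2} (the only values B's loop uses)
def pvSetN (names : List Char × List Char × List Char) (idx : Int) (cur : List Char) :
    List Char × List Char × List Char :=
  if idx = 2 then (names.1, names.2.1, cur)
  else if idx = 1 then (names.1, cur, names.2.2)
  else (cur, names.2.1, names.2.2)

-- B's loop: r is the reversed character list; cur is the segment being built (chars of the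
-- segment in reverse, as Source B appends them; a flush joins reversed(cur)); idx is the slot to
-- fill next; the loop breaks as soon as idx drops below 0; the trailing
-- `if idx >= 0 and cur` flush is the nil case.
def pvScan : List Char → List Char → Int → (List Char × List Char × List Char) →
    List Char × List Char × List Char
  | [], cur, idx, names => if 0 ≤ idx ∧ cur ≠ [] then pvSetN names idx cur.reverse else names
  | c :: r, cur, idx, names =>
    if c = '.' then
      if cur ≠ [] then
        let names' := pvSetN names idx cur.reverse
        if idx - 1 < 0 then names' else pvScan r [] (idx - 1) names'
      else pvScan r cur idx names
    else pvScan r (cur ++ [c]) idx names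

def parse_logical_names_py_alt (identifier : String) : String × String × String :=
  let n := pvScan identifier.toList.reverse [] 2 ([], [], [])
  (String.ofList n.1, String.ofList n.2.1, String.ofList n.2.2)

-- ===== PRECONDITION & SPEC =====
def Spec_parse_logical_names_py (identifier : String) (out : String × String × String) : Prop := out = parse_logical_names_py_alt identifier
instance (identifier : String) (out : String × String × String) : Decidable (Spec_parse_logical_names_py identifier out) := by unfold Spec_parse_logical_names_py; infer_instance

-- ===== CLAIM (what is proved, stated in full; the proofs are below) =====
def Claim_equal_parse_logical_names_py : Prop := ∀ (identifier : String), Dom_parse_logical_names_py identifier → Spec_parse_logical_names_py identifier (parse_logical_names_py identifier)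

-- ===== LEMMAS AND PROOFS =====

-- simple recursive form of splitting on a single '.' (cur is the reversed current prefix segment)
def pvSd : List Char → List Char → List (List Char)
  | [], cur => [cur.reverse]
  | c :: t, cur => if c = '.' then cur.reverse :: pvSd t [] else pvSd t (c :: cur)

theorem pvGo_eq_sd (fuel : Nat) (l cur : List Char) (acc : List (List Char))
    (h : l.length ≤ fuel) :
    PySem.Chars.splitOn.go ['.'] fuel l cur acc = acc.reverse ++ pvSd l cur := by
  induction fuel generalizing l cur acc with
  | zero =>
    have : l = [] := by cases l <;> simp_all
    subst this
    simp [PySem.Chars.splitOn.go, pvSd]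
  | succ n ih =>
    cases l with
    | nil => simp [PySem.Chars.splitOn.go, pvSd]
    | cons c rest =>
      simp only [PySem.Chars.splitOn.go]
      by_cases hc : c = '.'
      · subst hc
        rw [if_pos (by simp [List.isPrefixOf])]
        rw [ih _ _ _ (by simpa using Nat.le_of_succ_le_succ h)]
        simp [pvSd]
      · rw [if_neg (by simp [List.isPrefixOf]; exact fun e => hc e.symm)]
        rw [ih _ _ _ (by simpa using Nat.le_of_succ_le_succ h)]
        simp [pvSd, hc]

theorem pvSplitOn_eq_sd (s : List Char) : PySem.Chars.splitOn s ['.'] = pvSd s [] := by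
  unfold PySem.Chars.splitOn
  simpa using pvGo_eq_sd (s.length + 1) s [] [] (by omega)

-- the list of nonempty segments met when scanning the reversed string, cur the pending suffix
def pvRsegs : List Char → List Char → List (List Char)
  | [], cur => if cur ≠ [] then [cur] else []
  | c :: r, cur =>
    if c = '.' then (if cur ≠ [] then [cur] else []) ++ pvRsegs r [] else pvRsegs r (c :: cur)

-- pure fill of the slots 2,1,0 with successive segments
def pvFill (names : List Char × List Char × List Char) (idx : Int) :
    List (List Char) → List Char × List Char × List Char
  | [] => names
  | x :: xs => if idx < 0 then names else pvFill (pvSetN names idx x) (idx - 1) xs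

theorem pvFill_neg (names : List Char × List Char × List Char) (idx : Int) (l : List (List Char))
    (h : idx < 0) : pvFill names idx l = names := by
  cases l <;> simp [pvFill, h]

theorem pvScan_eq_fill (r : List Char) : ∀ (cur : List Char) (idx : Int)
    (names : List Char × List Char × List Char), 0 ≤ idx →
    pvScan r cur idx names = pvFill names idx (pvRsegs r cur.reverse) := by
  induction r with
  | nil =>
    intro cur idx names h
    by_cases hc : cur = []
    · simp [pvScan, pvRsegs, pvFill, hc]
    · simp [pvScan, pvRsegs, pvFill, hc, h, not_lt.mpr h]
  | cons c r ih =>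
    intro cur idx names h
    by_cases hdot : c = '.'
    · subst hdot
      by_cases hc : cur = []
      · simp only [pvScan, pvRsegs, hc]
        simpa [pvRsegs] using ih [] idx names h
      · have hcr : cur.reverse ≠ [] := by simpa using hc
        simp only [pvScan, pvRsegs, hc, hcr, ite_true, ne_eq, not_false_iff]
        have hr : pvFill names idx ([cur.reverse] ++ pvRsegs r []) =
            pvFill (pvSetN names idx cur.reverse) (idx - 1) (pvRsegs r []) := by
          simp [pvFill, not_lt.mpr h]
        rw [hr]
        by_cases hneg : idx - 1 < 0
        · rw [if_pos hneg, pvFill_neg _ _ _ hneg]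
        · rw [if_neg hneg]
          simpa [pvRsegs] using ih [] (idx - 1) (pvSetN names idx cur.reverse) (by omega)
    · simp only [pvScan, pvRsegs, if_neg hdot]
      have := ih (cur ++ [c]) idx names h
      simpa using this

theorem pvSd_append_dot (x : List Char) : ∀ (y cur : List Char),
    pvSd (x ++ '.' :: y) cur = pvSd x cur ++ pvSd y [] := by
  induction x with
  | nil => intro y cur; simp [pvSd]
  | cons c t ih =>
    intro y cur
    by_cases hc : c = '.'
    · simp [pvSd, hc, ih]
    · simp [pvSd, hc, ih]

theorem pvSd_nodot (cur : List Char) (h : '.' ∉ cur) : pvSd cur [] = [cur] := by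
  suffices h2 : ∀ (pre : List Char), pvSd cur pre = [pre.reverse ++ cur] by
    simpa using h2 []
  induction cur with
  | nil => intro pre; simp [pvSd]
  | cons c t ih =>
    intro pre
    have hc : c ≠ '.' := fun e => h (e ▸ List.mem_cons_self)
    have ht : '.' ∉ t := fun m => h (List.mem_cons_of_mem _ m)
    rw [pvSd, if_neg hc]
    rw [ih ht (c :: pre)]
    simp

theorem pvRsegs_eq (r : List Char) : ∀ (cur : List Char), '.' ∉ cur →
    pvRsegs r cur = ((pvSd (r.reverse ++ cur) []).filter (fun p => p ≠ [])).reverse := by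
  induction r with
  | nil =>
    intro cur h
    simp only [List.reverse_nil, List.nil_append]
    rw [pvSd_nodot cur h]
    by_cases hc : cur = [] <;> simp [pvRsegs, hc]
  | cons c r ih =>
    intro cur h
    by_cases hc : c = '.'
    · subst hc
      rw [pvRsegs, if_pos rfl]
      have he : ('.' :: r).reverse ++ cur = r.reverse ++ '.' :: cur := by simp
      rw [he, pvSd_append_dot, pvSd_nodot cur h, List.filter_append, List.reverse_append]
      rw [ih [] (by simp)]
      by_cases hcc : cur = [] <;> simp [hcc]
    · rw [pvRsegs, if_neg hc]
      rw [ih (c :: cur) (by simp [h, Ne.symm hc])]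
      congr 2
      simp

-- final assembly on the segment level
theorem pvFill_eq_cascade (segs : List (List Char)) :
    pvCascade (segs.map String.ofList) =
      (let n := pvFill ([], [], []) 2 segs.reverse
       (String.ofList n.1, String.ofList n.2.1, String.ofList n.2.2)) := by
  match segs, (rfl : segs.reverse = segs.reverse) with
  | [], _ => decide
  | [a], _ => simp [pvCascade, pvFill, pvSetN, PySem.List.pyGetD, PySem.List.pyGet?, PySem.List.pyIdx?]
  | [a, b], _ => simp [pvCascade, pvFill, pvSetN, PySem.List.pyGetD, PySem.List.pyGet?, PySem.List.pyIdx?]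
  | [a, b, c], _ => simp [pvCascade, pvFill, pvSetN, PySem.List.pyGetD, PySem.List.pyGet?, PySem.List.pyIdx?]
  | p :: q :: u :: v :: t, _ =>
    generalize hl : p :: q :: u :: v :: t = l
    have h4 : 4 ≤ l.length := by rw [← hl]; simp
    have hdlen : (l.drop (l.length - 3)).length = 3 := by simp; omega
    obtain ⟨x, y, z, hxyz⟩ := List.length_eq_three.mp hdlen
    have hl2 : l = l.take (l.length - 3) ++ [x, y, z] := by
      rw [← hxyz, List.take_append_drop]
    set w := l.take (l.length - 3) with hw
    have hrev : l.reverse = z :: y :: x :: w.reverse := by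
      rw [hl2]; simp
    -- RHS
    have hr : pvFill ([], [], []) 2 l.reverse = (x, y, z) := by
      rw [hrev]
      show pvFill ([], [], []) 2 (z :: y :: x :: w.reverse) = (x, y, z)
      rw [pvFill, if_neg (by norm_num), pvFill, if_neg (by norm_num),
          pvFill, if_neg (by norm_num)]
      norm_num [pvSetN]
      exact pvFill_neg _ _ _ (by norm_num)
    -- LHS
    have hmap : l.map String.ofList = w.map String.ofList ++
        [String.ofList x, String.ofList y, String.ofList z] := by
      rw [hl2]; simp
    have hmlen : (l.map String.ofList).length = w.length + 3 := by
      rw [hmap]; simp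
    have g3 : PySem.List.pyGetD (l.map String.ofList) (-1) "" = String.ofList z := by
      rw [PySem.List.pyGetD_neg_ofNat (l.map String.ofList) 1 "" (by omega) (by simp; omega)]
      have q : (l.map String.ofList)[(l.map String.ofList).length - 1]? =
          some (String.ofList z) := by
        rw [hmap]
        simp
      exact (List.getElem?_eq_some_iff.mp q).2
    have g2 : PySem.List.pyGetD (l.map String.ofList) (-2) "" = String.ofList y := by
      rw [PySem.List.pyGetD_neg_ofNat (l.map String.ofList) 2 "" (by omega) (by simp; omega)]
      have q : (l.map String.ofList)[(l.map String.ofList).length - 2]? =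
          some (String.ofList y) := by
        rw [hmap]
        simp
      exact (List.getElem?_eq_some_iff.mp q).2
    have g1 : PySem.List.pyGetD (l.map String.ofList) (-3) "" = String.ofList x := by
      rw [PySem.List.pyGetD_neg_ofNat (l.map String.ofList) 3 "" (by omega) (by simp; omega)]
      have q : (l.map String.ofList)[(l.map String.ofList).length - 3]? =
          some (String.ofList x) := by
        rw [hmap]
        simp
      exact (List.getElem?_eq_some_iff.mp q).2
    rw [pvCascade, if_pos (by simpa using h4)]
    rw [g1, g2, g3, hr]

-- A's filtered parts are the mapped nonempty segments
theorem pvFilter_map (L : List (List Char)) :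
    (L.map String.ofList).filter (fun p => p ≠ "") =
      (L.filter (fun p => p ≠ [])).map String.ofList := by
  induction L with
  | nil => rfl
  | cons a t ih =>
    by_cases ha : a = []
    · subst ha; simpa using ih
    · have hne : String.ofList a ≠ "" := by
        intro e
        apply ha
        have := congrArg String.toList e
        simpa using this
      simp only [List.map_cons, List.filter_cons, hne, ha, ne_eq, not_false_iff,
        decide_true, if_pos]
      rw [ih]

-- ===== VERDICT (by name: the statement is the Claim_ definition above) =====
theorem parse_logical_names_py_spec : Claim_equal_parse_logical_names_py := by
  intro identifier _
  unfold Spec_parse_logical_names_py parse_logical_names_py parse_logical_names_py_alt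
  have hsplit : PySem.Str.split? identifier "." =
      some ((PySem.Chars.splitOn identifier.toList ['.']).map String.ofList) := by
    simp [PySem.Str.split?, PySem.Chars.split?]
  rw [hsplit]
  simp only [Option.getD_some]
  rw [pvSplitOn_eq_sd, pvFilter_map]
  rw [pvScan_eq_fill _ _ _ _ (by norm_num)]
  simp only [List.reverse_nil]
  rw [pvRsegs_eq _ [] (by simp)]
  simp only [List.reverse_reverse, List.append_nil]
  exact pvFill_eq_cascade ((pvSd identifier.toList []).filter (fun p => p ≠ []))
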